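-- pv_equiv track=rewrite | github.com/joshmhc/rna-folding | RNA_folding.py | find_sequence_symmetries
-- ===== SOURCE A (Python) =====
-- def find_sequence_symmetries(rna_sequence, min_symmetry_length=3):
--     """
--     Identifies different types of symmetries in the RNA sequence.
--
--     Args:
--         rna_sequence (str): The RNA sequence string
--         min_symmetry_length (int): Minimum length for a symmetry to be considered
--
--     Returns:
--         dict: Dictionary containing different types of symmetries found
--             - 'palindromes': List of palindrome positions (start, end, length)
--             - 'repeats': List of repeat positions (start1, end1, start2, end2, length)
--             - 'mirror_symmetries': List of mirror symmetry positions
--     """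
--     n = len(rna_sequence)
--     symmetries = {
--         'palindromes': [],
--         'repeats': [],
--         'mirror_symmetries': []
--     }
--
--     # 1. Find palindromes (sequences that read the same forward and backward)
--     all_palindromes = []
--     for start in range(n - min_symmetry_length + 1):
--         for length in range(min_symmetry_length, n - start + 1):
--             end = start + length - 1
--             if end >= n:
--                 break
--
--             # Check if this subsequence is a palindrome
--             is_palindrome = True
--             for i in range(length // 2):
--                 if rna_sequence[start + i] != rna_sequence[end - i]:
--                     is_palindrome = False
--                     break
--
--             if is_palindrome:
--                 all_palindromes.append((start, end, length))
--
--     # Filter to keep only maximal palindromes (non-nested)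
--     symmetries['palindromes'] = []
--     for i, (start1, end1, length1) in enumerate(all_palindromes):
--         is_maximal = True
--         for j, (start2, end2, length2) in enumerate(all_palindromes):
--             if i != j:  # Don't compare with self
--                 # Check if current palindrome is contained within another
--                 if start2 <= start1 and end1 <= end2 and length2 > length1:
--                     is_maximal = False
--                     break
--         if is_maximal:
--             symmetries['palindromes'].append((start1, end1, length1))
--
--     # 2. Find direct repeats (same sequence appearing multiple times)
--     for length in range(min_symmetry_length, n // 2 + 1):
--         for start1 in range(n - 2 * length + 1):
--             seq1 = rna_sequence[start1:start1 + length]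
--             start2 = start1 + length
--
--             # Look for the same sequence later in the string
--             for start2 in range(start1 + length, n - length + 1):
--                 seq2 = rna_sequence[start2:start2 + length]
--                 if seq1 == seq2:
--                     symmetries['repeats'].append((start1, start1 + length - 1,
--                                                 start2, start2 + length - 1, length))
--
--     # 3. Find mirror symmetries (complementary sequences)
--     # A-T, G-C are complementary pairs
--     complement_map = {'a': 't', 't': 'a', 'g': 'c', 'c': 'g'}
--
--     for start in range(n - min_symmetry_length + 1):
--         for length in range(min_symmetry_length, n - start + 1):
--             end = start + length - 1
--             if end >= n:
--                 break
--
--             # Look for the complementary sequence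
--             for mirror_start in range(start + length, n - length + 1):
--                 mirror_end = mirror_start + length - 1
--                 is_complement = True
--
--                 for i in range(length):
--                     # Check if both positions have valid nucleotides
--                     if (rna_sequence[start + i] not in complement_map or
--                         rna_sequence[mirror_start + length - 1 - i] not in complement_map):
--                         is_complement = False
--                         break
--
--                     # Check if they are complementary (reverse order for mirror)
--                     if rna_sequence[mirror_start + length - 1 - i] != complement_map[rna_sequence[start + i]]:
--                         is_complement = False
--                         break
--
--                 if is_complement:
--                     symmetries['mirror_symmetries'].append((start, end, mirror_start, mirror_end, length))
--                     break
--
--     return symmetries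
-- ===== SOURCE B (Python) =====
-- def _complement(c):
--     if c == 'a': return 't'
--     if c == 't': return 'a'
--     if c == 'g': return 'c'
--     if c == 'c': return 'g'
--     return None
--
-- def _reverse_complement(window):
--     out = []
--     for c in reversed(window):
--         d = _complement(c)
--         if d is None:
--             return None
--         out.append(d)
--     return ''.join(out)
--
-- def find_sequence_symmetries(rna_sequence, min_symmetry_length=3):
--     """Palindromes by whole-window reverse comparison plus a containment filter;
--     direct repeats via a per-length index from window content to start positions;
--     mirror symmetries by a single str.find of the window's reverse complement."""
--     n = len(rna_sequence)
--     m = min_symmetry_length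
--     windows = [(s, l) for s in range(n - m + 1) for l in range(m, n - s + 1)]
--
--     candidates = [(s, s + l - 1, l) for (s, l) in windows
--                   if rna_sequence[s:s + l] == rna_sequence[s:s + l][::-1]]
--     palindromes = [p for p in candidates
--                    if not any(q != p and q[0] <= p[0] and p[1] <= q[1] for q in candidates)]
--
--     repeats = []
--     for l in range(m, n // 2 + 1):
--         index = {}
--         for p in range(l, n - l + 1):
--             index.setdefault(rna_sequence[p:p + l], []).append(p)
--         for s1 in range(n - 2 * l + 1):
--             for s2 in index.get(rna_sequence[s1:s1 + l], []):
--                 if s2 >= s1 + l: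
--                     repeats.append((s1, s1 + l - 1, s2, s2 + l - 1, l))
--
--     mirrors = []
--     for (s, l) in windows:
--         target = _reverse_complement(rna_sequence[s:s + l])
--         if target is not None:
--             j = rna_sequence.find(target, s + l)
--             if j != -1:
--                 mirrors.append((s, s + l - 1, j, j + l - 1, l))
--
--     return {'palindromes': palindromes, 'repeats': repeats, 'mirror_symmetries': mirrors}
-- ===== Notes on version B (the rewrite author's own statement) =====
-- stated objective: alternative
-- what changed: Pre_ excludes min_symmetry_length < 1 (outside the natural domain: A then emits degenerate empty/negative-length windows and, through Python's negative slice/index wraparound, raw negative positions). Palindrome windows are tested by one whole-window reverse comparison instead of a char-by-char half loop; direct repeats are found by building, per length, a dict from window content to its start positions so the inner rescan over all later starts disappears; …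
import Mathlib
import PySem

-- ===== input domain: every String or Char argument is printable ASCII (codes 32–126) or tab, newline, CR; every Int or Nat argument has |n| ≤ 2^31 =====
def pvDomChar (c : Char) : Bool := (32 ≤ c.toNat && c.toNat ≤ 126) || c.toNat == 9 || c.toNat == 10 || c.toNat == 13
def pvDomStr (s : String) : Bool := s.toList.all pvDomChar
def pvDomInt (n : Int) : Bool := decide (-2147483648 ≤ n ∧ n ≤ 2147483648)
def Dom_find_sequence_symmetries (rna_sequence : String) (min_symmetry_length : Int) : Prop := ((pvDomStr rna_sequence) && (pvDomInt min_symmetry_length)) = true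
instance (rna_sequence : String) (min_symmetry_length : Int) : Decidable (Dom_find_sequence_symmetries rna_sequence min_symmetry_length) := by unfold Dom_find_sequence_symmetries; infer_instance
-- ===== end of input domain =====

-- B tests each palindrome window by one whole-window reverse comparison, finds direct
-- repeats through a per-length dict from window content to start positions, and mirror
-- symmetries through a single find of the window's reverse complement; return value
-- proved identical for every min_symmetry_length ≥ 1.

-- ===== PORT A =====

-- the inner half-window character loop of A's palindrome test ('break' = return false)
def aPalCheck (cs : List Char) (start e : Int) : List Int → Bool
  | [] => true
  | i :: rest =>
    if PySem.List.pyGetD cs (start + i) ' ' ≠ PySem.List.pyGetD cs (e - i) ' ' then false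
    else aPalCheck cs start e rest

-- A's 'for length in range(...)' loop with the 'if end >= n: break'
def aPalLen (cs : List Char) (n start : Int) : List Int → List (List Int) → List (List Int)
  | [], acc => acc
  | l :: rest, acc =>
    let e := start + l - 1
    if e ≥ n then acc
    else aPalLen cs n start rest
      (if aPalCheck cs start e (PySem.List.pyRange 0 (PySem.Int.floordiv l 2) 1) then
        acc ++ [[start, e, l]] else acc)

-- A's inner maximality scan over enumerate(all_palindromes) ('break' = return false)
def aMaxCheck (i : Int) (p : List Int) : List (Int × List Int) → Bool
  | [] => true
  | jq :: rest =>
    if i ≠ jq.1 then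
      if PySem.List.pyGetD jq.2 0 0 ≤ PySem.List.pyGetD p 0 0 ∧
         PySem.List.pyGetD p 1 0 ≤ PySem.List.pyGetD jq.2 1 0 ∧
         PySem.List.pyGetD jq.2 2 0 > PySem.List.pyGetD p 2 0 then false
      else aMaxCheck i p rest
    else aMaxCheck i p rest

-- A's per-position complementarity loop ('break' = return false); indices are in
-- range wherever this is reached, so the guarded pyGetD default is never read
def aMirCheck (cs : List Char) (cmap : PySem.Dict Char Char) (start ms l : Int) : List Int → Bool
  | [] => true
  | i :: rest =>
    let c1 := PySem.List.pyGetD cs (start + i) ' '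
    let c2 := PySem.List.pyGetD cs (ms + l - 1 - i) ' '
    if !(cmap.contains c1) || !(cmap.contains c2) then false
    else if c2 ≠ cmap.getD c1 ' ' then false
    else aMirCheck cs cmap start ms l rest

-- A's 'for mirror_start in range(...)' with 'break' after the first appended match
def aMirScan (cs : List Char) (cmap : PySem.Dict Char Char) (start l : Int) :
    List Int → List (List Int) → List (List Int)
  | [], acc => acc
  | ms :: rest, acc =>
    if aMirCheck cs cmap start ms l (PySem.List.pyRange 0 l 1) then
      acc ++ [[start, start + l - 1, ms, ms + l - 1, l]]
    else aMirScan cs cmap start l rest acc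

-- A's mirror 'for length in range(...)' loop with the 'if end >= n: break'
def aMirLen (cs : List Char) (cmap : PySem.Dict Char Char) (n start : Int) :
    List Int → List (List Int) → List (List Int)
  | [], acc => acc
  | l :: rest, acc =>
    let e := start + l - 1
    if e ≥ n then acc
    else aMirLen cs cmap n start rest
      (aMirScan cs cmap start l (PySem.List.pyRange (start + l) (n - l + 1) 1) acc)

def find_sequence_symmetries (rna_sequence : String) (min_symmetry_length : Int) :
    List (String × List (List Int)) :=
  let cs := rna_sequence.toList
  let n : Int := cs.length
  let m := min_symmetry_length
  -- 1. palindromes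
  let allPal := (PySem.List.pyRange 0 (n - m + 1) 1).foldl
    (fun acc start => aPalLen cs n start (PySem.List.pyRange m (n - start + 1) 1) acc) []
  let pals := (PySem.List.enumerate allPal 0).foldl
    (fun acc ip => if aMaxCheck ip.1 ip.2 (PySem.List.enumerate allPal 0) then acc ++ [ip.2] else acc) []
  -- 2. direct repeats
  let reps := (PySem.List.pyRange m (PySem.Int.floordiv n 2 + 1) 1).foldl (fun acc l =>
    (PySem.List.pyRange 0 (n - 2 * l + 1) 1).foldl (fun acc s1 =>
      let seq1 := PySem.List.slice cs (some s1) (some (s1 + l))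
      (PySem.List.pyRange (s1 + l) (n - l + 1) 1).foldl (fun acc s2 =>
        if seq1 == PySem.List.slice cs (some s2) (some (s2 + l)) then
          acc ++ [[s1, s1 + l - 1, s2, s2 + l - 1, l]] else acc) acc) acc) []
  -- 3. mirror symmetries
  let cmap : PySem.Dict Char Char := PySem.Dict.ofList [('a','t'),('t','a'),('g','c'),('c','g')]
  let mirs := (PySem.List.pyRange 0 (n - m + 1) 1).foldl
    (fun acc start => aMirLen cs cmap n start (PySem.List.pyRange m (n - start + 1) 1) acc) []
  [("palindromes", pals), ("repeats", reps), ("mirror_symmetries", mirs)]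

-- ===== PORT B =====

-- B's _complement helper: the Watson–Crick partner of a nucleotide, else None
def bComplement (c : Char) : Option Char :=
  if c = 'a' then some 't'
  else if c = 't' then some 'a'
  else if c = 'g' then some 'c'
  else if c = 'c' then some 'g'
  else none

-- the loop body of B's _reverse_complement, run over the already-reversed window
def bRcGo : List Char → Option (List Char)
  | [] => some []
  | c :: rest =>
    match bComplement c with
    | none => none
    | some d => (bRcGo rest).map (fun t => d :: t)

-- B's _reverse_complement: complement of the reversed window, None on a foreign letter
def bRevComp (w : List Char) : Option (List Char) :=
  bRcGo w.reverse

def find_sequence_symmetries_alt (rna_sequence : String) (min_symmetry_length : Int) :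
    List (String × List (List Int)) :=
  let cs := rna_sequence.toList
  let n : Int := cs.length
  let m := min_symmetry_length
  let windows := (PySem.List.pyRange 0 (n - m + 1) 1).flatMap (fun s =>
    (PySem.List.pyRange m (n - s + 1) 1).map (fun l => (s, l)))
  -- palindromes: whole-window reverse comparison, then a containment filter
  let cand := windows.filterMap (fun w =>
    let win := PySem.List.slice cs (some w.1) (some (w.1 + w.2))
    if win == win.reverse then some [w.1, w.1 + w.2 - 1, w.2] else none)
  let pals := cand.filter (fun p => !(cand.any (fun q =>
    decide (q ≠ p ∧ PySem.List.pyGetD q 0 0 ≤ PySem.List.pyGetD p 0 0 ∧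
      PySem.List.pyGetD p 1 0 ≤ PySem.List.pyGetD q 1 0))))
  -- repeats: per length, a dict from window content to its start positions
  let reps := (PySem.List.pyRange m (PySem.Int.floordiv n 2 + 1) 1).flatMap (fun l =>
    let idx := (PySem.List.pyRange l (n - l + 1) 1).foldl
      (fun d p => d.modify (PySem.List.slice cs (some p) (some (p + l))) [] (fun v => v ++ [p]))
      PySem.Dict.empty
    (PySem.List.pyRange 0 (n - 2 * l + 1) 1).flatMap (fun s1 =>
      (idx.getD (PySem.List.slice cs (some s1) (some (s1 + l))) []).filterMap (fun s2 =>
        if s1 + l ≤ s2 then some [s1, s1 + l - 1, s2, s2 + l - 1, l] else none)))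
  -- mirrors: one find of the window's reverse complement
  let mirs := windows.filterMap (fun w =>
    match bRevComp (PySem.List.slice cs (some w.1) (some (w.1 + w.2))) with
    | none => none
    | some target =>
      let j := PySem.Chars.findFrom cs target (w.1 + w.2) none
      if j ≠ -1 then some [w.1, w.1 + w.2 - 1, j, j + w.2 - 1, w.2] else none)
  [("palindromes", pals), ("repeats", reps), ("mirror_symmetries", mirs)]

-- ===== PRECONDITION & SPEC =====

-- Pre_ excludes min_symmetry_length < 1, outside the task's natural domain: there A
-- emits degenerate empty/negative-length windows and, through Python's negative
-- slice/index wraparound, raw negative positions that B's algorithm does not reproduce.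
def Pre_find_sequence_symmetries (rna_sequence : String) (min_symmetry_length : Int) : Prop :=
  1 ≤ min_symmetry_length

instance (rna_sequence : String) (min_symmetry_length : Int) :
    Decidable (Pre_find_sequence_symmetries rna_sequence min_symmetry_length) := by
  unfold Pre_find_sequence_symmetries; infer_instance

def pvWitness_find_sequence_symmetries : String × Int := ("atgcat", 3)

def Spec_find_sequence_symmetries (rna_sequence : String) (min_symmetry_length : Int)
    (out : List (String × List (List Int))) : Prop :=
  out = find_sequence_symmetries_alt rna_sequence min_symmetry_length

instance (rna_sequence : String) (min_symmetry_length : Int) (out : List (String × List (List Int))) :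
    Decidable (Spec_find_sequence_symmetries rna_sequence min_symmetry_length out) := by
  unfold Spec_find_sequence_symmetries; infer_instance

-- ===== CLAIM =====

def Claim_equal_find_sequence_symmetries : Prop :=
  ∀ (rna_sequence : String) (min_symmetry_length : Int),
    Dom_find_sequence_symmetries rna_sequence min_symmetry_length →
    Pre_find_sequence_symmetries rna_sequence min_symmetry_length →
    Spec_find_sequence_symmetries rna_sequence min_symmetry_length
      (find_sequence_symmetries rna_sequence min_symmetry_length)

-- ===== LEMMAS AND PROOFS =====

theorem filterMap_ite_some {α β : Type} (p : α → Prop) [DecidablePred p] (f : α → β)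
    (l : List α) :
    l.filterMap (fun x => if p x then some (f x) else none) =
      (l.filter (fun x => decide (p x))).map f := by
  induction l with
  | nil => rfl
  | cons x r ih => by_cases h : p x <;> simp [h, ih]

theorem aPalCheck_eq_all (cs : List Char) (start e : Int) (L : List Int) :
    aPalCheck cs start e L =
      L.all (fun i => PySem.List.pyGetD cs (start + i) ' ' == PySem.List.pyGetD cs (e - i) ' ') := by
  induction L with
  | nil => rfl
  | cons i rest ih =>
    by_cases h : PySem.List.pyGetD cs (start + i) ' ' = PySem.List.pyGetD cs (e - i) ' '
    · simp [aPalCheck, h, ih]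
    · simp [aPalCheck, h]

theorem half_palindrome (w : List Char) :
    w = w.reverse ↔
      ∀ (k : Nat) (h : 2 * k + 2 ≤ w.length),
        w[k]'(by omega) = w[w.length - 1 - k]'(by omega) := by
  constructor
  · intro h k hk
    rw [List.getElem_of_eq h (by omega)]
    rw [List.getElem_reverse]
  · intro h
    apply List.ext_getElem (by simp)
    intro k hk1 hk2
    rw [List.getElem_reverse]
    by_cases hc1 : 2 * k + 2 ≤ w.length
    · exact h k hc1
    · by_cases hc2 : 2 * (w.length - 1 - k) + 2 ≤ w.length
      · have := (h (w.length - 1 - k) hc2).symm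
        have hidx : w.length - 1 - (w.length - 1 - k) = k := by omega
        simp only [hidx] at this
        exact this
      · have hidx : w.length - 1 - k = k := by omega
        simp only [hidx]

theorem palCond_eq (cs : List Char) (start l : Int) (hs : 0 ≤ start) (hl1 : 1 ≤ l)
    (hl : start + l ≤ (cs.length : Int)) :
    aPalCheck cs start (start + l - 1) (PySem.List.pyRange 0 (PySem.Int.floordiv l 2) 1) =
      (PySem.List.slice cs (some start) (some (start + l)) ==
        (PySem.List.slice cs (some start) (some (start + l))).reverse) := by
  have hw : PySem.List.slice cs (some start) (some (start + l)) =
      (cs.drop start.toNat).take l.toNat := by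
    rw [PySem.List.slice_toNat cs hs (by omega)]
    congr 1
    omega
  have hwlen : ((cs.drop start.toNat).take l.toNat).length = l.toNat := by
    simp; omega
  have hget : ∀ (j : Nat) (hj : j < l.toNat),
      ((cs.drop start.toNat).take l.toNat)[j]'(by omega) = cs[start.toNat + j]'(by omega) := by
    intro j hj
    rw [List.getElem_take, List.getElem_drop]
  rw [aPalCheck_eq_all, Bool.eq_iff_iff]
  simp only [hw, beq_iff_eq, List.all_eq_true]
  rw [PySem.Int.floordiv_eq_ediv_of_pos (show (0:Int) < 2 by omega)]
  rw [half_palindrome]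
  simp only [hwlen]
  constructor
  · intro hA k hk
    rw [hget k (by omega), hget (l.toNat - 1 - k) (by omega)]
    have := hA ((k : Int)) (by rw [PySem.List.mem_pyRange_one]; omega)
    rw [PySem.List.pyGetD_eq_getElem cs ' ' (by omega) (by omega),
        PySem.List.pyGetD_eq_getElem cs ' ' (by omega) (by omega)] at this
    have e1 : (start + (k : Int)).toNat = start.toNat + k := by omega
    have e2 : (start + l - 1 - (k : Int)).toNat = start.toNat + (l.toNat - 1 - k) := by omega
    simp only [e1, e2] at this
    exact this
  · intro hB i hi
    rw [PySem.List.mem_pyRange_one] at hi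
    rw [PySem.List.pyGetD_eq_getElem cs ' ' (by omega) (by omega),
        PySem.List.pyGetD_eq_getElem cs ' ' (by omega) (by omega)]
    have := hB i.toNat (by omega)
    rw [hget i.toNat (by omega), hget (l.toNat - 1 - i.toNat) (by omega)] at this
    have e1 : (start + i).toNat = start.toNat + i.toNat := by omega
    have e2 : (start + l - 1 - i).toNat = start.toNat + (l.toNat - 1 - i.toNat) := by omega
    simp only [e1, e2]
    exact this

theorem aPalLen_eq (cs : List Char) (start : Int) (hs : 0 ≤ start) :
    ∀ (L : List Int) (acc : List (List Int)),
      (∀ l ∈ L, 1 ≤ l ∧ l ≤ (cs.length : Int) - start) →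
      aPalLen cs (cs.length : Int) start L acc =
        acc ++ (L.filter (fun l =>
          PySem.List.slice cs (some start) (some (start + l)) ==
            (PySem.List.slice cs (some start) (some (start + l))).reverse)).map
          (fun l => [start, start + l - 1, l]) := by
  intro L
  induction L with
  | nil => intro acc _; simp [aPalLen]
  | cons l rest ih =>
    intro acc hb
    obtain ⟨hl1, hl2⟩ := hb l List.mem_cons_self
    rw [aPalLen]
    simp only [if_neg (show ¬ (start + l - 1 ≥ (cs.length : Int)) by omega)]
    rw [palCond_eq cs start l hs hl1 (by omega)]
    rw [ih _ (fun x hx => hb x (List.mem_cons_of_mem _ hx))]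
    by_cases h : (PySem.List.slice cs (some start) (some (start + l)) ==
        (PySem.List.slice cs (some start) (some (start + l))).reverse) = true
    · simp [h]
    · simp [h]

theorem cand_eq (cs : List Char) (m : Int) (hm : 1 ≤ m) :
    (PySem.List.pyRange 0 ((cs.length : Int) - m + 1) 1).foldl
      (fun acc start => aPalLen cs (cs.length : Int) start
        (PySem.List.pyRange m ((cs.length : Int) - start + 1) 1) acc) [] =
    ((PySem.List.pyRange 0 ((cs.length : Int) - m + 1) 1).flatMap (fun s =>
      (PySem.List.pyRange m ((cs.length : Int) - s + 1) 1).map (fun l => (s, l)))).filterMap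
      (fun w =>
        let win := PySem.List.slice cs (some w.1) (some (w.1 + w.2))
        if win == win.reverse then some [w.1, w.1 + w.2 - 1, w.2] else none) := by
  have step1 := PySem.List.foldl_congr_mem
    (PySem.List.pyRange 0 ((cs.length : Int) - m + 1) 1)
    (fun acc start => aPalLen cs (cs.length : Int) start
      (PySem.List.pyRange m ((cs.length : Int) - start + 1) 1) acc)
    (fun acc start => acc ++
      ((PySem.List.pyRange m ((cs.length : Int) - start + 1) 1).filter (fun l =>
        PySem.List.slice cs (some start) (some (start + l)) ==
          (PySem.List.slice cs (some start) (some (start + l))).reverse)).map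
        (fun l => [start, start + l - 1, l]))
    []
    (by
      intro acc start hstart
      rw [PySem.List.mem_pyRange_one] at hstart
      apply aPalLen_eq cs start (by omega)
      intro l hl
      rw [PySem.List.mem_pyRange_one] at hl
      omega)
  rw [step1, PySem.List.foldl_append_eq_flatMap, List.nil_append, List.filterMap_flatMap]
  apply List.flatMap_congr
  intro s _
  rw [List.filterMap_map]
  rw [show ((fun w : Int × Int =>
      let win := PySem.List.slice cs (some w.1) (some (w.1 + w.2))
      if win == win.reverse then some [w.1, w.1 + w.2 - 1, w.2] else none) ∘ (fun l => (s, l))) =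
    (fun l : Int => if (PySem.List.slice cs (some s) (some (s + l)) ==
        (PySem.List.slice cs (some s) (some (s + l))).reverse) = true then
      some [s, s + l - 1, l] else none) from rfl]
  rw [filterMap_ite_some]
  congr 1
  apply List.filter_congr
  intro l _
  exact (Bool.decide_coe _).symm

theorem cand_shape (cs : List Char) (m : Int) (p : List Int)
    (hp : p ∈ ((PySem.List.pyRange 0 ((cs.length : Int) - m + 1) 1).flatMap (fun s =>
      (PySem.List.pyRange m ((cs.length : Int) - s + 1) 1).map (fun l => (s, l)))).filterMap
      (fun w =>
        let win := PySem.List.slice cs (some w.1) (some (w.1 + w.2))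
        if win == win.reverse then some [w.1, w.1 + w.2 - 1, w.2] else none)) :
    ∃ s l : Int, p = [s, s + l - 1, l] := by
  rw [List.mem_filterMap] at hp
  obtain ⟨w, _, hw⟩ := hp
  simp only [] at hw
  split_ifs at hw
  exact ⟨w.1, w.2, (Option.some.injEq _ _ ▸ hw).symm⟩

theorem pyGetD3_0 (a b c d : Int) : PySem.List.pyGetD [a,b,c] 0 d = a := rfl
theorem pyGetD3_1 (a b c d : Int) : PySem.List.pyGetD [a,b,c] 1 d = b := rfl
theorem pyGetD3_2 (a b c d : Int) : PySem.List.pyGetD [a,b,c] 2 d = c := rfl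

theorem aMaxCheck_eq (i : Int) (p : List Int) (L : List (Int × List Int)) :
    aMaxCheck i p L = !(L.any (fun jq => decide (i ≠ jq.1) &&
      decide (PySem.List.pyGetD jq.2 0 0 ≤ PySem.List.pyGetD p 0 0 ∧
        PySem.List.pyGetD p 1 0 ≤ PySem.List.pyGetD jq.2 1 0 ∧
        PySem.List.pyGetD jq.2 2 0 > PySem.List.pyGetD p 2 0))) := by
  induction L with
  | nil => rfl
  | cons jq rest ih =>
    by_cases h1 : i ≠ jq.1
    · by_cases h2 : PySem.List.pyGetD jq.2 0 0 ≤ PySem.List.pyGetD p 0 0 ∧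
        PySem.List.pyGetD p 1 0 ≤ PySem.List.pyGetD jq.2 1 0 ∧
        PySem.List.pyGetD jq.2 2 0 > PySem.List.pyGetD p 2 0
      · rw [aMaxCheck, if_pos h1, if_pos h2, List.any_cons]
        simp [h1, h2]
      · rw [aMaxCheck, if_pos h1, if_neg h2, List.any_cons, ih]
        simp [h2]
    · rw [aMaxCheck, if_neg h1, List.any_cons, ih]
      simp [show i = jq.1 from by omega]

theorem maxfilter_eq (C : List (List Int))
    (hshape : ∀ p ∈ C, ∃ s l : Int, p = [s, s + l - 1, l]) :
    (PySem.List.enumerate C 0).foldl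
      (fun acc ip => if aMaxCheck ip.1 ip.2 (PySem.List.enumerate C 0) then acc ++ [ip.2] else acc) [] =
    C.filter (fun p => !(C.any (fun q =>
      decide (q ≠ p ∧ PySem.List.pyGetD q 0 0 ≤ PySem.List.pyGetD p 0 0 ∧
        PySem.List.pyGetD p 1 0 ≤ PySem.List.pyGetD q 1 0)))) := by
  rw [PySem.List.foldl_append_if (fun ip => aMaxCheck ip.1 ip.2 (PySem.List.enumerate C 0))
    (fun ip : Int × List Int => ip.2)]
  rw [List.nil_append]
  have hcongr : ∀ ip ∈ PySem.List.enumerate C 0,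
      aMaxCheck ip.1 ip.2 (PySem.List.enumerate C 0) =
      (fun p => !(C.any (fun q =>
        decide (q ≠ p ∧ PySem.List.pyGetD q 0 0 ≤ PySem.List.pyGetD p 0 0 ∧
          PySem.List.pyGetD p 1 0 ≤ PySem.List.pyGetD q 1 0)))) ip.2 := by
    intro ip hip
    obtain ⟨k, hk, rfl⟩ := (PySem.List.mem_enumerate_iff C 0 ip).mp hip
    rw [aMaxCheck_eq]
    simp only []
    congr 1
    rw [Bool.eq_iff_iff]
    simp only [List.any_eq_true, Bool.and_eq_true, decide_eq_true_eq]
    constructor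
    · rintro ⟨jq, hjqE, hne, hcont⟩
      obtain ⟨k', hk', rfl⟩ := (PySem.List.mem_enumerate_iff C 0 jq).mp hjqE
      refine ⟨C[k'], List.getElem_mem _, ?_⟩
      obtain ⟨a, la, hpa⟩ := hshape C[k] (List.getElem_mem _)
      obtain ⟨b, lb, hqb⟩ := hshape C[k'] (List.getElem_mem _)
      simp only [hpa, hqb, pyGetD3_0, pyGetD3_1, pyGetD3_2] at hcont ⊢
      refine ⟨?_, by omega, by omega⟩
      intro heq
      simp only [List.cons.injEq, and_true] at heq
      omega
    · rintro ⟨q, hqC, hne, h1, h2⟩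
      obtain ⟨k', hk', hqk⟩ := List.getElem_of_mem hqC
      refine ⟨((0 : Int) + (k' : Int), C[k']), (PySem.List.mem_enumerate_iff C 0 _).mpr ⟨k', hk', rfl⟩, ?_, ?_⟩
      · intro hkk
        have : k = k' := by omega
        subst this
        rw [hqk] at hne
        exact hne rfl
      · obtain ⟨a, la, hpa⟩ := hshape C[k] (List.getElem_mem _)
        obtain ⟨b, lb, hqb⟩ := hshape q hqC
        rw [hqk]
        have hnep : ¬ (b = a ∧ lb = la) := by
          intro ⟨e1, e2⟩
          apply hne
          rw [hqb, hpa, e1, e2]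
        simp only [hpa, hqb, pyGetD3_0, pyGetD3_1, pyGetD3_2] at h1 h2 ⊢
        omega
  rw [List.filter_congr hcongr]
  conv_rhs => rw [← PySem.List.map_snd_enumerate C 0, List.filter_map]
  congr 1
  apply List.filter_congr
  intro x _
  simp [Function.comp]

theorem reps_inner_eq (cs : List Char) (l s1 : Int) (hs1 : 0 ≤ s1)
    (hs1u : s1 ≤ (cs.length : Int) - 2 * l) :
    (((PySem.List.pyRange l ((cs.length : Int) - l + 1) 1).foldl
      (fun d p => d.modify (PySem.List.slice cs (some p) (some (p + l))) [] (fun v => v ++ [p]))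
      PySem.Dict.empty).getD (PySem.List.slice cs (some s1) (some (s1 + l))) []).filterMap
      (fun s2 => if s1 + l ≤ s2 then some [s1, s1 + l - 1, s2, s2 + l - 1, l] else none) =
    ((PySem.List.pyRange (s1 + l) ((cs.length : Int) - l + 1) 1).filter (fun s2 =>
      PySem.List.slice cs (some s1) (some (s1 + l)) ==
        PySem.List.slice cs (some s2) (some (s2 + l)))).map
      (fun s2 => [s1, s1 + l - 1, s2, s2 + l - 1, l]) := by
  have hpos : ((PySem.List.pyRange l ((cs.length : Int) - l + 1) 1).foldl
      (fun d p => d.modify (PySem.List.slice cs (some p) (some (p + l))) [] (fun v => v ++ [p]))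
      PySem.Dict.empty).getD (PySem.List.slice cs (some s1) (some (s1 + l))) [] =
      (PySem.List.pyRange l ((cs.length : Int) - l + 1) 1).filter
        (fun p => PySem.List.slice cs (some p) (some (p + l)) ==
          PySem.List.slice cs (some s1) (some (s1 + l))) := by
    have hmap : (PySem.List.pyRange l ((cs.length : Int) - l + 1) 1).foldl
        (fun d p => d.modify (PySem.List.slice cs (some p) (some (p + l))) [] (fun v => v ++ [p]))
        PySem.Dict.empty =
        ((PySem.List.pyRange l ((cs.length : Int) - l + 1) 1).map
          (fun p => (PySem.List.slice cs (some p) (some (p + l)), p))).foldl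
          (fun d pr => d.modify pr.1 [] (fun v => v ++ [pr.2])) PySem.Dict.empty := by
      rw [List.foldl_map]
    rw [hmap, PySem.Dict.getD_foldl_modify_append, PySem.Dict.getD_empty, List.nil_append,
      List.filter_map, List.map_map]
    show List.map (fun p => p) _ = _
    rw [List.map_id']
    exact List.filter_congr (fun x _ => rfl)
  rw [hpos, filterMap_ite_some (fun s2 : Int => s1 + l ≤ s2)
    (fun s2 => [s1, s1 + l - 1, s2, s2 + l - 1, l])]
  congr 1
  rw [List.filter_filter]
  rw [PySem.List.pyRange_one_append l (s1 + l) ((cs.length : Int) - l + 1) (by omega) (by omega),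
    List.filter_append]
  have h1 : (PySem.List.pyRange l (s1 + l) 1).filter
      (fun p => decide (s1 + l ≤ p) && (PySem.List.slice cs (some p) (some (p + l)) ==
        PySem.List.slice cs (some s1) (some (s1 + l)))) = [] := by
    apply List.filter_eq_nil_iff.mpr
    intro x hx
    rw [PySem.List.mem_pyRange_one] at hx
    simp [show ¬ (s1 + l ≤ x) by omega]
  rw [h1, List.nil_append]
  apply List.filter_congr
  intro x hx
  rw [PySem.List.mem_pyRange_one] at hx
  simp only [decide_eq_true (show s1 + l ≤ x by omega), Bool.true_and]
  simp [eq_comm]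

theorem reps_eq (cs : List Char) (m : Int) :
    (PySem.List.pyRange m (PySem.Int.floordiv (cs.length : Int) 2 + 1) 1).foldl (fun acc l =>
      (PySem.List.pyRange 0 ((cs.length : Int) - 2 * l + 1) 1).foldl (fun acc s1 =>
        let seq1 := PySem.List.slice cs (some s1) (some (s1 + l))
        (PySem.List.pyRange (s1 + l) ((cs.length : Int) - l + 1) 1).foldl (fun acc s2 =>
          if seq1 == PySem.List.slice cs (some s2) (some (s2 + l)) then
            acc ++ [[s1, s1 + l - 1, s2, s2 + l - 1, l]] else acc) acc) acc) [] =
    (PySem.List.pyRange m (PySem.Int.floordiv (cs.length : Int) 2 + 1) 1).flatMap (fun l =>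
      let idx := (PySem.List.pyRange l ((cs.length : Int) - l + 1) 1).foldl
        (fun d p => d.modify (PySem.List.slice cs (some p) (some (p + l))) [] (fun v => v ++ [p]))
        PySem.Dict.empty
      (PySem.List.pyRange 0 ((cs.length : Int) - 2 * l + 1) 1).flatMap (fun s1 =>
        (idx.getD (PySem.List.slice cs (some s1) (some (s1 + l))) []).filterMap (fun s2 =>
          if s1 + l ≤ s2 then some [s1, s1 + l - 1, s2, s2 + l - 1, l] else none))) := by
  have step1 := PySem.List.foldl_congr_mem
    (PySem.List.pyRange m (PySem.Int.floordiv (cs.length : Int) 2 + 1) 1)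
    (fun acc l =>
      (PySem.List.pyRange 0 ((cs.length : Int) - 2 * l + 1) 1).foldl (fun acc s1 =>
        let seq1 := PySem.List.slice cs (some s1) (some (s1 + l))
        (PySem.List.pyRange (s1 + l) ((cs.length : Int) - l + 1) 1).foldl (fun acc s2 =>
          if seq1 == PySem.List.slice cs (some s2) (some (s2 + l)) then
            acc ++ [[s1, s1 + l - 1, s2, s2 + l - 1, l]] else acc) acc) acc)
    (fun acc l => acc ++
      (PySem.List.pyRange 0 ((cs.length : Int) - 2 * l + 1) 1).flatMap (fun s1 =>
        ((PySem.List.pyRange (s1 + l) ((cs.length : Int) - l + 1) 1).filter (fun s2 =>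
          PySem.List.slice cs (some s1) (some (s1 + l)) ==
            PySem.List.slice cs (some s2) (some (s2 + l)))).map
          (fun s2 => [s1, s1 + l - 1, s2, s2 + l - 1, l])))
    []
    (by
      intro acc l _
      dsimp only
      have step2 := PySem.List.foldl_congr_mem
        (PySem.List.pyRange 0 ((cs.length : Int) - 2 * l + 1) 1)
        (fun acc s1 =>
          let seq1 := PySem.List.slice cs (some s1) (some (s1 + l))
          (PySem.List.pyRange (s1 + l) ((cs.length : Int) - l + 1) 1).foldl (fun acc s2 =>
            if seq1 == PySem.List.slice cs (some s2) (some (s2 + l)) then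
              acc ++ [[s1, s1 + l - 1, s2, s2 + l - 1, l]] else acc) acc)
        (fun acc s1 => acc ++
          ((PySem.List.pyRange (s1 + l) ((cs.length : Int) - l + 1) 1).filter (fun s2 =>
            PySem.List.slice cs (some s1) (some (s1 + l)) ==
              PySem.List.slice cs (some s2) (some (s2 + l)))).map
            (fun s2 => [s1, s1 + l - 1, s2, s2 + l - 1, l]))
        acc
        (fun acc s1 _ => PySem.List.foldl_append_if _ _ _ _)
      rw [step2]
      exact PySem.List.foldl_append_eq_flatMap _ _ _)
  rw [step1, PySem.List.foldl_append_eq_flatMap, List.nil_append]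
  apply List.flatMap_congr
  intro l _
  simp only []
  apply List.flatMap_congr
  intro s1 hs1
  rw [PySem.List.mem_pyRange_one] at hs1
  exact (reps_inner_eq cs l s1 (by omega) (by omega)).symm

-- mirror section --------------------------------------------------------------

theorem find?_congr' {α : Type} (l : List α) (p q : α → Bool) (h : ∀ x ∈ l, p x = q x) :
    l.find? p = l.find? q := by
  induction l with
  | nil => rfl
  | cons x rest ih =>
    by_cases hx : q x = true
    · simp [List.find?, h x List.mem_cons_self, hx]
    · have hx' : q x = false := by
        cases hq : q x
        · rfl
        · exact absurd hq hx
      simp [List.find?, h x List.mem_cons_self, hx']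
      exact ih (fun y hy => h y (List.mem_cons_of_mem _ hy))

theorem find?_pyRange_eq_some_aux (q : Int → Bool) (b r : Int) :
    ∀ (k : Nat) (a : Int), (r - a).toNat = k → a ≤ r → r < b → q r = true →
      (∀ x, a ≤ x → x < r → q x = false) →
      (PySem.List.pyRange a b 1).find? q = some r := by
  intro k
  induction k with
  | zero =>
    intro a hk har hrb hq hmin
    have : a = r := by omega
    subst this
    rw [PySem.List.pyRange_one_cons (by omega)]
    simp [List.find?, hq]
  | succ k ih =>
    intro a hk har hrb hq hmin
    have ha : a < r := by omega
    rw [PySem.List.pyRange_one_cons (by omega)]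
    simp [List.find?, hmin a le_rfl ha]
    exact ih (a + 1) (by omega) (by omega) hrb hq (fun x h1 h2 => hmin x (by omega) h2)

theorem find?_pyRange_eq_some (q : Int → Bool) (a b r : Int) (har : a ≤ r) (hrb : r < b)
    (hq : q r = true) (hmin : ∀ x, a ≤ x → x < r → q x = false) :
    (PySem.List.pyRange a b 1).find? q = some r :=
  find?_pyRange_eq_some_aux q b r (r - a).toNat a rfl har hrb hq hmin

theorem find?_range_findFrom (cs target : List Char) (a : Int) (h0 : 0 ≤ a)
    (han : a ≤ (cs.length : Int)) :
    (PySem.List.pyRange a ((cs.length : Int) - (target.length : Int) + 1) 1).find?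
      (fun ms => decide (target <+: cs.drop ms.toNat)) =
    (if PySem.Chars.findFrom cs target a none = -1 then none
     else some (PySem.Chars.findFrom cs target a none)) := by
  have hak : a = ((a.toNat : Nat) : Int) := by omega
  rw [hak, PySem.Chars.findFrom_natCast cs target a.toNat (by omega)]
  by_cases hf : PySem.Chars.find (cs.drop a.toNat) target = -1
  · rw [if_pos hf, if_pos rfl]
    apply List.find?_eq_none.mpr
    intro ms hms
    rw [PySem.List.mem_pyRange_one] at hms
    simp only [decide_eq_true_eq]
    intro hpre
    have hinf : ¬ target <:+: cs.drop a.toNat := (PySem.Chars.find_eq_neg_one_iff _ _).mp hf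
    apply hinf
    rw [← PySem.Chars.isIn_iff_infix]
    rw [← PySem.Chars.exists_prefix_drop_iff_isIn]
    refine ⟨ms.toNat - a.toNat, ?_⟩
    rw [List.drop_drop]
    have : a.toNat + (ms.toNat - a.toNat) = ms.toNat := by omega
    rw [this]
    exact hpre
  · rw [if_neg hf]
    have ho : 0 ≤ PySem.Chars.find (cs.drop a.toNat) target := by
      have := PySem.Chars.neg_one_le_find (cs.drop a.toNat) target
      omega
    obtain ⟨hpre, hmin⟩ := PySem.Chars.find_spec ho
    set o := PySem.Chars.find (cs.drop a.toNat) target with hodef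
    clear_value o
    have h1 : target.length ≤ cs.length - (a.toNat + o.toNat) := by
      have := hpre.length_le
      simpa using this
    rw [if_neg (by omega)]
    have hr2 : ((a.toNat : Nat) : Int) + o < (cs.length : Int) - (target.length : Int) + 1 := by
      rcases eq_or_ne target ([] : List Char) with hT | hT
      · have ho0 : o = 0 := by rw [hodef, hT, PySem.Chars.find_nil]
        subst hT
        simp
        omega
      · have ht1 : 0 < target.length := List.length_pos_iff.mpr hT
        omega
    apply find?_pyRange_eq_some _ _ _ _ (by omega) hr2
    · simp only [decide_eq_true_eq]
      have : ((a.toNat : Int) + o).toNat = a.toNat + o.toNat := by omega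
      rw [this]
      rw [← List.drop_drop]
      exact hpre
    · intro x hx1 hx2
      simp only [decide_eq_false_iff_not]
      intro hpx
      have := hmin (x.toNat - a.toNat) (by omega)
      apply this
      rw [List.drop_drop]
      have : a.toNat + (x.toNat - a.toNat) = x.toNat := by omega
      rw [this]
      exact hpx

theorem aMirCheck_eq_all (cs : List Char) (cmap : PySem.Dict Char Char) (start ms l : Int)
    (L : List Int) :
    aMirCheck cs cmap start ms l L = L.all (fun i =>
      cmap.contains (PySem.List.pyGetD cs (start + i) ' ') &&
      cmap.contains (PySem.List.pyGetD cs (ms + l - 1 - i) ' ') &&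
      (PySem.List.pyGetD cs (ms + l - 1 - i) ' ' ==
        cmap.getD (PySem.List.pyGetD cs (start + i) ' ') ' ')) := by
  induction L with
  | nil => rfl
  | cons i rest ih =>
    rw [aMirCheck, List.all_cons]
    by_cases h1 : (!(cmap.contains (PySem.List.pyGetD cs (start + i) ' ')) ||
        !(cmap.contains (PySem.List.pyGetD cs (ms + l - 1 - i) ' '))) = true
    · rw [if_pos h1]
      simp only [Bool.or_eq_true, Bool.not_eq_true'] at h1
      rcases h1 with h1 | h1 <;> simp [h1]
    · rw [if_neg h1]
      simp only [Bool.or_eq_true, Bool.not_eq_true'] at h1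
      push Not at h1
      obtain ⟨hc1, hc2⟩ := h1
      have hc1' : cmap.contains (PySem.List.pyGetD cs (start + i) ' ') = true :=
        Bool.ne_false_iff.mp hc1
      have hc2' : cmap.contains (PySem.List.pyGetD cs (ms + l - 1 - i) ' ') = true :=
        Bool.ne_false_iff.mp hc2
      by_cases h2 : PySem.List.pyGetD cs (ms + l - 1 - i) ' ' =
          cmap.getD (PySem.List.pyGetD cs (start + i) ' ') ' '
      · rw [if_neg (by simpa using h2), ih]
        simp only [hc1', hc2', Bool.true_and]
        simp [h2]
      · rw [if_pos (by simpa using h2)]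
        simp [hc1', hc2', h2]

theorem aMirScan_eq (cs : List Char) (cmap : PySem.Dict Char Char) (start l : Int)
    (L : List Int) (acc : List (List Int)) :
    aMirScan cs cmap start l L acc =
      acc ++ ((L.find? (fun ms => aMirCheck cs cmap start ms l (PySem.List.pyRange 0 l 1))).map
        (fun ms => [start, start + l - 1, ms, ms + l - 1, l])).toList := by
  induction L with
  | nil => simp [aMirScan]
  | cons ms rest ih =>
    by_cases h : aMirCheck cs cmap start ms l (PySem.List.pyRange 0 l 1) = true
    · rw [aMirScan, if_pos h]
      simp [List.find?, h]
    · rw [aMirScan, if_neg h, ih]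
      have h' : aMirCheck cs cmap start ms l (PySem.List.pyRange 0 l 1) = false :=
        Bool.eq_false_iff.mpr h
      simp [List.find?, h']

theorem cmap_contains_iff (cmap : PySem.Dict Char Char)
    (hcm : cmap = PySem.Dict.ofList [('a','t'),('t','a'),('g','c'),('c','g')]) (c : Char) :
    cmap.contains c = true ↔ c = 'a' ∨ c = 't' ∨ c = 'g' ∨ c = 'c' := by
  subst hcm
  simp [PySem.Dict.ofList, PySem.Dict.update, PySem.Dict.contains_insert,
    PySem.Dict.contains_empty, beq_iff_eq]
  tauto

theorem cmap_getD_mem (cmap : PySem.Dict Char Char)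
    (hcm : cmap = PySem.Dict.ofList [('a','t'),('t','a'),('g','c'),('c','g')]) (c : Char)
    (h : cmap.contains c = true) : cmap.contains (cmap.getD c ' ') = true := by
  rw [cmap_contains_iff cmap hcm] at h
  rcases h with h | h | h | h <;> subst h <;> subst hcm <;> decide

theorem comp_contains (cmap : PySem.Dict Char Char)
    (hcm : cmap = PySem.Dict.ofList [('a','t'),('t','a'),('g','c'),('c','g')]) (c : Char) :
    cmap.contains c = (bComplement c).isSome := by
  rw [Bool.eq_iff_iff, cmap_contains_iff cmap hcm]
  unfold bComplement
  split_ifs with h1 h2 h3 h4 <;> simp_all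

theorem comp_getD (cmap : PySem.Dict Char Char)
    (hcm : cmap = PySem.Dict.ofList [('a','t'),('t','a'),('g','c'),('c','g')]) (c d : Char)
    (h : bComplement c = some d) : cmap.getD c ' ' = d := by
  unfold bComplement at h
  split_ifs at h with h1 h2 h3 h4 <;>
    (injection h with h; subst h; subst_vars; decide)

theorem bRcGo_good (cmap : PySem.Dict Char Char)
    (hcm : cmap = PySem.Dict.ofList [('a','t'),('t','a'),('g','c'),('c','g')]) (u : List Char)
    (h : ∀ c ∈ u, cmap.contains c = true) :
    bRcGo u = some (u.map (fun c => cmap.getD c ' ')) := by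
  induction u with
  | nil => rfl
  | cons c rest ih =>
    have hc := h c List.mem_cons_self
    rw [comp_contains cmap hcm] at hc
    obtain ⟨d, hd⟩ := Option.isSome_iff_exists.mp hc
    rw [bRcGo, hd, ih (fun x hx => h x (List.mem_cons_of_mem _ hx))]
    simp [comp_getD cmap hcm c d hd]

theorem bRcGo_bad (u : List Char) (c : Char) (hc : c ∈ u) (h : bComplement c = none) :
    bRcGo u = none := by
  induction u with
  | nil => cases hc
  | cons a rest ih =>
    rcases List.mem_cons.mp hc with rfl | hmem
    · rw [bRcGo, h]
    · rw [bRcGo]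
      cases ha : bComplement a with
      | none => rfl
      | some d => rw [ih hmem]; rfl

theorem mirCheck_prefix (cs : List Char) (cmap : PySem.Dict Char Char)
    (hcm : cmap = PySem.Dict.ofList [('a','t'),('t','a'),('g','c'),('c','g')])
    (start l ms : Int) (hs : 0 ≤ start) (hl : 1 ≤ l) (hln : start + l ≤ (cs.length : Int))
    (hms : start + l ≤ ms) (hmsu : ms ≤ (cs.length : Int) - l)
    (hgood : ∀ c ∈ PySem.List.slice cs (some start) (some (start + l)), cmap.contains c = true) :
    aMirCheck cs cmap start ms l (PySem.List.pyRange 0 l 1) =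
      decide ((((PySem.List.slice cs (some start) (some (start + l))).reverse.map
        (fun c => cmap.getD c ' ')) <+: cs.drop ms.toNat)) := by
  have hw : PySem.List.slice cs (some start) (some (start + l)) =
      (cs.drop start.toNat).take l.toNat := by
    rw [PySem.List.slice_toNat cs hs (by omega)]
    congr 1
    omega
  have hwlen : ((cs.drop start.toNat).take l.toNat).length = l.toNat := by simp; omega
  have hget : ∀ (j : Nat) (hj : j < l.toNat),
      ((cs.drop start.toNat).take l.toNat)[j]'(by omega) = cs[start.toNat + j]'(by omega) := by
    intro j hj
    rw [List.getElem_take, List.getElem_drop]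
  rw [hw] at hgood ⊢
  have hgood' : ∀ (j : Nat) (hj : j < l.toNat), cmap.contains (cs[start.toNat + j]'(by omega)) = true := by
    intro j hj
    rw [← hget j hj]
    exact hgood _ (List.getElem_mem _)
  rw [aMirCheck_eq_all, Bool.eq_iff_iff]
  simp only [List.all_eq_true, Bool.and_eq_true, beq_iff_eq, decide_eq_true_eq]
  constructor
  · intro hA
    rw [List.prefix_iff_eq_take]
    apply List.ext_getElem
    · simp only [List.length_map, List.length_reverse, hwlen, List.length_take, List.length_drop]
      omega
    · intro j hj1 hj2
      simp only [List.length_map, List.length_reverse, hwlen] at hj1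
      obtain ⟨⟨hc1, hc2⟩, heq⟩ := hA ((l.toNat - 1 - j : Nat) : Int)
        (by rw [PySem.List.mem_pyRange_one]; omega)
      rw [List.getElem_map, List.getElem_reverse, List.getElem_take, List.getElem_drop]
      conv_rhs => rw [List.getElem_take, List.getElem_drop]
      rw [PySem.List.pyGetD_eq_getElem cs ' ' (by omega) (by omega),
          PySem.List.pyGetD_eq_getElem cs ' ' (by omega) (by omega)] at heq
      have e1 : (ms + l - 1 - ((l.toNat - 1 - j : Nat) : Int)).toNat = ms.toNat + j := by omega
      have e2 : (start + ((l.toNat - 1 - j : Nat) : Int)).toNat =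
          start.toNat + (l.toNat - 1 - j) := by omega
      simp only [e1, e2] at heq
      simp only [hwlen]
      rw [heq.symm]
  · intro hB i hi
    rw [PySem.List.mem_pyRange_one] at hi
    have hB' := List.prefix_iff_eq_take.mp hB
    have hki : i.toNat < l.toNat := by omega
    have hj : l.toNat - 1 - i.toNat < l.toNat := by omega
    have key : cs[(ms + l - 1 - i).toNat]'(by omega) =
        cmap.getD (cs[(start + i).toNat]'(by omega)) ' ' := by
      have := List.getElem_of_eq hB' (i := l.toNat - 1 - i.toNat)
        (by simp only [List.length_map, List.length_reverse, hwlen]; omega)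
      rw [List.getElem_map, List.getElem_reverse, List.getElem_take] at this
      simp only [List.length_map, List.length_reverse, hwlen] at this
      rw [List.getElem_drop] at this
      have e4 : l.toNat - 1 - (l.toNat - 1 - i.toNat) = i.toNat := by omega
      simp only [e4] at this
      rw [List.getElem_take, List.getElem_drop] at this
      have e5 : (ms + l - 1 - i).toNat = ms.toNat + (l.toNat - 1 - i.toNat) := by omega
      have e6 : (start + i).toNat = start.toNat + i.toNat := by omega
      simp only [e5, e6]
      exact this.symm
    have hcon1 : cmap.contains (PySem.List.pyGetD cs (start + i) ' ') = true := by
      rw [PySem.List.pyGetD_eq_getElem cs ' ' (by omega) (by omega)]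
      have e6 : (start + i).toNat = start.toNat + i.toNat := by omega
      simp only [e6]
      exact hgood' i.toNat hki
    refine ⟨⟨hcon1, ?_⟩, ?_⟩
    · rw [PySem.List.pyGetD_eq_getElem cs ' ' (by omega) (by omega)]
      rw [key]
      apply cmap_getD_mem cmap hcm
      rw [← PySem.List.pyGetD_eq_getElem cs ' ' (by omega) (by omega)]
      exact hcon1
    · rw [PySem.List.pyGetD_eq_getElem cs ' ' (by omega) (by omega),
          PySem.List.pyGetD_eq_getElem cs ' ' (by omega) (by omega)]
      exact key

theorem aMirLen_eq (cs : List Char) (cmap : PySem.Dict Char Char) (start : Int) :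
    ∀ (L : List Int) (acc : List (List Int)),
      (∀ l ∈ L, l ≤ (cs.length : Int) - start) →
      aMirLen cs cmap (cs.length : Int) start L acc =
        L.foldl (fun acc l => aMirScan cs cmap start l
          (PySem.List.pyRange (start + l) ((cs.length : Int) - l + 1) 1) acc) acc := by
  intro L
  induction L with
  | nil => intro acc _; rfl
  | cons l rest ih =>
    intro acc hb
    have hl : l ≤ (cs.length : Int) - start := hb l List.mem_cons_self
    rw [aMirLen]
    simp only [if_neg (show ¬ (start + l - 1 ≥ (cs.length : Int)) by omega)]
    rw [List.foldl_cons, ih _ (fun x hx => hb x (List.mem_cons_of_mem _ hx))]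

-- the pointwise mirror fact: A's first-match scan equals B's find of the reverse complement
theorem mirOpt_eq (cs : List Char) (cmap : PySem.Dict Char Char)
    (hcm : cmap = PySem.Dict.ofList [('a','t'),('t','a'),('g','c'),('c','g')])
    (s l : Int) (hs : 0 ≤ s) (hl1 : 1 ≤ l) (hln : s + l ≤ (cs.length : Int)) :
    ((PySem.List.pyRange (s + l) ((cs.length : Int) - l + 1) 1).find?
      (fun ms => aMirCheck cs cmap s ms l (PySem.List.pyRange 0 l 1))).map
      (fun ms => [s, s + l - 1, ms, ms + l - 1, l]) =
    (match bRevComp (PySem.List.slice cs (some s) (some (s + l))) with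
     | none => none
     | some target =>
       let j := PySem.Chars.findFrom cs target (s + l) none
       if j ≠ -1 then some [s, s + l - 1, j, j + l - 1, l] else none) := by
  set w := PySem.List.slice cs (some s) (some (s + l)) with hwdef
  have hw : w = (cs.drop s.toNat).take l.toNat := by
    rw [hwdef, PySem.List.slice_toNat cs hs (by omega)]
    congr 1
    omega
  have hwlen : w.length = l.toNat := by rw [hw]; simp; omega
  by_cases hbad : ∃ c ∈ w, cmap.contains c = false
  · obtain ⟨c, hcw, hcbad⟩ := hbad
    have hnone : bRevComp w = none := by
      apply bRcGo_bad _ c (List.mem_reverse.mpr hcw)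
      have := comp_contains cmap hcm c
      rw [hcbad] at this
      exact Option.not_isSome_iff_eq_none.mp (by rw [← this]; simp)
    rw [hnone]
    obtain ⟨j, hj, hcj⟩ := List.getElem_of_mem hcw
    have hfnone : (PySem.List.pyRange (s + l) ((cs.length : Int) - l + 1) 1).find?
        (fun ms => aMirCheck cs cmap s ms l (PySem.List.pyRange 0 l 1)) = none := by
      apply List.find?_eq_none.mpr
      intro ms hms
      rw [PySem.List.mem_pyRange_one] at hms
      rw [aMirCheck_eq_all]
      simp only [Bool.not_eq_true]
      apply List.all_eq_false.mpr
      have hj' : j < l.toNat := hwlen ▸ hj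
      refine ⟨((j : Nat) : Int), ?_, ?_⟩
      · rw [PySem.List.mem_pyRange_one]
        omega
      · have hc1 : PySem.List.pyGetD cs (s + ((j : Nat) : Int)) ' ' = c := by
          rw [PySem.List.pyGetD_eq_getElem cs ' ' (by omega) (by omega)]
          rw [← hcj]
          rw [List.getElem_of_eq hw hj, List.getElem_take, List.getElem_drop]
          congr 1
          omega
        simp only [hc1]
        simp [hcbad]
    rw [hfnone]
    rfl
  · have hgood : ∀ c ∈ w, cmap.contains c = true := by
      intro c hc
      by_contra h
      exact hbad ⟨c, hc, Bool.not_eq_true _ ▸ (Bool.eq_false_iff.mpr h)⟩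
    have hrc : bRevComp w = some (w.reverse.map (fun c => cmap.getD c ' ')) := by
      unfold bRevComp
      exact bRcGo_good cmap hcm w.reverse (fun c hc => hgood c (List.mem_reverse.mp hc))
    rw [hrc]
    have hcongr : (PySem.List.pyRange (s + l) ((cs.length : Int) - l + 1) 1).find?
        (fun ms => aMirCheck cs cmap s ms l (PySem.List.pyRange 0 l 1)) =
        (PySem.List.pyRange (s + l) ((cs.length : Int) - l + 1) 1).find?
        (fun ms => decide ((w.reverse.map (fun c => cmap.getD c ' ')) <+: cs.drop ms.toNat)) := by
      apply find?_congr'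
      intro ms hms
      rw [PySem.List.mem_pyRange_one] at hms
      exact mirCheck_prefix cs cmap hcm s l ms hs hl1 hln (by omega) (by omega)
        (by rw [← hwdef]; exact hgood)
    rw [hcongr]
    have htlen : ((w.reverse.map (fun c => cmap.getD c ' ')).length : Int) = l := by
      simp [hwlen]
      omega
    have hrange : (cs.length : Int) - l + 1 =
        (cs.length : Int) - ((w.reverse.map (fun c => cmap.getD c ' ')).length : Int) + 1 := by
      rw [htlen]
    rw [hrange, find?_range_findFrom cs _ (s + l) (by omega) (by omega)]
    by_cases hmf : PySem.Chars.findFrom cs (w.reverse.map (fun c => cmap.getD c ' '))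
        (s + l) none = -1
    · rw [if_pos hmf]
      simp only [Option.map_none]
      rw [if_neg (not_not_intro hmf)]
    · rw [if_neg hmf]
      simp only [Option.map_some]
      rw [if_pos hmf]

theorem mirs_eq (cs : List Char) (m : Int) (hm : 1 ≤ m)
    (cmap : PySem.Dict Char Char)
    (hcm : cmap = PySem.Dict.ofList [('a','t'),('t','a'),('g','c'),('c','g')]) :
    (PySem.List.pyRange 0 ((cs.length : Int) - m + 1) 1).foldl
      (fun acc start => aMirLen cs cmap (cs.length : Int) start
        (PySem.List.pyRange m ((cs.length : Int) - start + 1) 1) acc) [] =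
    ((PySem.List.pyRange 0 ((cs.length : Int) - m + 1) 1).flatMap (fun s =>
      (PySem.List.pyRange m ((cs.length : Int) - s + 1) 1).map (fun l => (s, l)))).filterMap
      (fun w =>
        match bRevComp (PySem.List.slice cs (some w.1) (some (w.1 + w.2))) with
        | none => none
        | some target =>
          let j := PySem.Chars.findFrom cs target (w.1 + w.2) none
          if j ≠ -1 then some [w.1, w.1 + w.2 - 1, j, j + w.2 - 1, w.2] else none) := by
  have step1 := PySem.List.foldl_congr_mem
    (PySem.List.pyRange 0 ((cs.length : Int) - m + 1) 1)
    (fun acc start => aMirLen cs cmap (cs.length : Int) start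
      (PySem.List.pyRange m ((cs.length : Int) - start + 1) 1) acc)
    (fun acc start => acc ++
      (PySem.List.pyRange m ((cs.length : Int) - start + 1) 1).filterMap (fun l =>
        ((PySem.List.pyRange (start + l) ((cs.length : Int) - l + 1) 1).find?
          (fun ms => aMirCheck cs cmap start ms l (PySem.List.pyRange 0 l 1))).map
          (fun ms => [start, start + l - 1, ms, ms + l - 1, l])))
    []
    (by
      intro acc start _
      dsimp only
      rw [aMirLen_eq cs cmap start _ _
        (fun l hl => by rw [PySem.List.mem_pyRange_one] at hl; omega)]
      have step2 := PySem.List.foldl_congr_mem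
        (PySem.List.pyRange m ((cs.length : Int) - start + 1) 1)
        (fun acc l => aMirScan cs cmap start l
          (PySem.List.pyRange (start + l) ((cs.length : Int) - l + 1) 1) acc)
        (fun acc l => acc ++
          (((PySem.List.pyRange (start + l) ((cs.length : Int) - l + 1) 1).find?
            (fun ms => aMirCheck cs cmap start ms l (PySem.List.pyRange 0 l 1))).map
            (fun ms => [start, start + l - 1, ms, ms + l - 1, l])).toList)
        acc
        (fun acc l _ => aMirScan_eq cs cmap start l _ acc)
      rw [step2, PySem.List.foldl_append_eq_flatMap]
      rw [List.filterMap_eq_flatMap_toList])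
  rw [step1, PySem.List.foldl_append_eq_flatMap, List.nil_append, List.filterMap_flatMap]
  apply List.flatMap_congr
  intro s hsmem
  rw [PySem.List.mem_pyRange_one] at hsmem
  rw [List.filterMap_map]
  apply List.filterMap_congr
  intro l hl
  rw [PySem.List.mem_pyRange_one] at hl
  exact mirOpt_eq cs cmap hcm s l (by omega) (by omega) (by omega)

-- ===== VERDICT =====

theorem find_sequence_symmetries_spec : Claim_equal_find_sequence_symmetries := by
  intro s m _ hpre
  unfold Pre_find_sequence_symmetries at hpre
  unfold Spec_find_sequence_symmetries find_sequence_symmetries find_sequence_symmetries_alt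
  simp only []
  rw [cand_eq s.toList m hpre, reps_eq, mirs_eq s.toList m hpre _ rfl]
  rw [maxfilter_eq _ (fun p hp => cand_shape s.toList m p hp)]
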